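-- pv_equiv track=rewrite | github.com/thush3304/qa-python-assessment-2a | programs/python2.py | nine
-- ===== SOURCE A (Python) =====
-- def nine(string1, string2):
--     s1 = string1
--     s2 = string2
--     if len(s2)>len(s1):
--         temp = s1
--         s1 = s2
--         s2 = temp
--     count = {s1[i] : 0 for i in range(len(s1))}
--
--     for i in range(len(s1)):
--         count[s1[i]] += 1
--     for i in range(len(s2)):
--         if (count.get(s2[i]) == None or count[s2[i]] == 0):
--             return False
--         count[s2[i]] -= 1
--     return True
-- ===== SOURCE B (Python) =====
-- def nine(string1, string2):
--     if len(string1) >= len(string2):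
--         big, small = string1, string2
--     else:
--         big, small = string2, string1
--     small_chars = list(small)
--     big_chars = list(big)
--     return all(small_chars.count(c) <= big_chars.count(c) for c in set(small_chars))
-- ===== Notes on version B (the rewrite author's own statement) =====
-- stated objective: simpler
-- what changed: Replaces A's mutable dict counter with early-exit decrementing loop by picking the longer string and checking, for each distinct character of the shorter one, that its count in the shorter string does not exceed its count in the longer string.
import Mathlib
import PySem

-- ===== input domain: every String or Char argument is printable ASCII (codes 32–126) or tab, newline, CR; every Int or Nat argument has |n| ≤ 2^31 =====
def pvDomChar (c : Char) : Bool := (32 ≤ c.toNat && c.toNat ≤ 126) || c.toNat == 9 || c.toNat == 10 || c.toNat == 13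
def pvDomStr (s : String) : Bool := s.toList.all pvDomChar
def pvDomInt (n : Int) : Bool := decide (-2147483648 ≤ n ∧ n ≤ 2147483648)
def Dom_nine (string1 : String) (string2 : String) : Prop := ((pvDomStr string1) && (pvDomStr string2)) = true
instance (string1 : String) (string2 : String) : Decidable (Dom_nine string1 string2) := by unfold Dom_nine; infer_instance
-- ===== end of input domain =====

-- B replaces A's mutable counting dict (decrement with early exit) by a per-distinct-character
-- count comparison over the shorter string; same value everywhere, no speed claim.

-- ===== PORT A =====
-- the second loop of A: for each char of s2, fail on a missing or exhausted key, else decrement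
def nineGo (count : PySem.Dict Char Int) : List Char → Bool
  | [] => true
  | c :: rest =>
    match count.get? c with
    | none => false                 -- count.get(s2[i]) == None
    | some v =>
      if v == 0 then false          -- count[s2[i]] == 0
      else nineGo (count.insert c (v - 1)) rest   -- count[s2[i]] -= 1

def nine (string1 : String) (string2 : String) : Bool :=
  -- swap so that s1 is the (strictly) longer string
  let p := if PySem.Str.len string2 > PySem.Str.len string1 then (string2, string1) else (string1, string2)
  let l1 := p.1.toList
  let l2 := p.2.toList
  -- {s1[i]: 0 for i in range(len(s1))}: i runs over every index, i.e. over s1's chars in order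
  let count0 : PySem.Dict Char Int := l1.foldl (fun d c => d.insert c 0) PySem.Dict.empty
  -- count[s1[i]] += 1: the key is always present, so the read is getD with any default
  let count := l1.foldl (fun d c => d.insert c (d.getD c 0 + 1)) count0
  nineGo count l2

-- ===== PORT B =====
def nine_alt (string1 : String) (string2 : String) : Bool :=
  let p := if PySem.Str.len string1 ≥ PySem.Str.len string2 then (string1, string2) else (string2, string1)
  let bigChars := p.1.toList
  let smallChars := p.2.toList
  (PySem.Set.ofList smallChars).all
    (fun c => decide (PySem.List.count smallChars c ≤ PySem.List.count bigChars c))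

-- ===== PRECONDITION & SPEC =====
def Spec_nine (string1 : String) (string2 : String) (out : Bool) : Prop := out = nine_alt string1 string2
instance (string1 : String) (string2 : String) (out : Bool) : Decidable (Spec_nine string1 string2 out) := by unfold Spec_nine; infer_instance

-- ===== CLAIM (what is proved, stated in full; the proofs are below) =====
def Claim_equal_nine : Prop := ∀ (string1 : String) (string2 : String), Dom_nine string1 string2 → Spec_nine string1 string2 (nine string1 string2)

-- ===== LEMMAS AND PROOFS =====

-- the dict comprehension: every char of l gets value 0, other keys untouched
lemma get?_fold_zero (l : List Char) (d0 : PySem.Dict Char Int) (x : Char) :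
    (l.foldl (fun d c => d.insert c (0 : Int)) d0).get? x
      = if x ∈ l then some 0 else d0.get? x := by
  induction l generalizing d0 with
  | nil => simp
  | cons c l ih =>
    simp only [List.foldl_cons, ih, PySem.Dict.get?_insert, List.mem_cons]
    by_cases hx : x ∈ l
    · simp [hx]
    · by_cases hc : x = c <;> simp [hx, hc]

-- the counting loop: adds l.count x to x's value, creating the key when x ∈ l
lemma get?_fold_incr (l : List Char) (d0 : PySem.Dict Char Int) (x : Char) :
    (l.foldl (fun d c => d.insert c (d.getD c 0 + 1)) d0).get? x
      = if x ∈ l ∨ (d0.get? x).isSome then some ((d0.get? x).getD 0 + l.count x) else none := by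
  induction l generalizing d0 with
  | nil => cases h : d0.get? x <;> simp [h]
  | cons c l ih =>
    simp only [List.foldl_cons]
    rw [ih]
    by_cases hc : x = c
    · subst hc
      rw [PySem.Dict.get?_insert_self]
      simp only [Option.isSome_some, or_true, if_pos, Option.getD_some, List.mem_cons, true_or,
        List.count_cons_self, PySem.Dict.getD_eq_get?_getD]
      congr 1
      push_cast
      ring
    · rw [PySem.Dict.get?_insert]
      simp [List.mem_cons, hc, Ne.symm hc]

-- the check loop returns true iff every needed count is available (dict values nonnegative)
lemma nineGo_iff (l2 : List Char) : ∀ d : PySem.Dict Char Int,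
    (∀ c v, d.get? c = some v → 0 ≤ v) →
    (nineGo d l2 = true ↔ ∀ c ∈ l2, (l2.count c : Int) ≤ (d.get? c).getD 0) := by
  induction l2 with
  | nil => intro d _; simp [nineGo]
  | cons c rest ih =>
    intro d hpos
    cases h : d.get? c with
    | none =>
      simp only [nineGo, h]
      constructor
      · intro hfalse; cases hfalse
      · intro hall
        have := hall c (by simp)
        simp [h, List.count_cons_self] at this
        omega
    | some v =>
      by_cases hv : v = 0
      · subst hv
        simp only [nineGo, h]
        constructor
        · intro hfalse; simp at hfalse
        · intro hall
          have := hall c (by simp)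
          simp [h, List.count_cons_self] at this
          omega
      · have hv1 : 1 ≤ v := by
          have := hpos c v h; omega
        have hpos' : ∀ x w, (d.insert c (v - 1)).get? x = some w → 0 ≤ w := by
          intro x w hx
          rw [PySem.Dict.get?_insert] at hx
          by_cases hxc : x = c
          · simp [hxc] at hx; omega
          · simp [hxc] at hx; exact hpos x w hx
        have hrec := ih (d.insert c (v - 1)) hpos'
        simp only [nineGo, h]
        have hbne : (v == 0) = false := by simp [hv]
        rw [hbne]
        simp only [Bool.false_eq_true, if_false, hrec]
        constructor
        · intro hall x hx
          rcases List.mem_cons.mp hx with hxc | hxr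
          · subst hxc
            by_cases hxr' : x ∈ rest
            · have h2 := hall x hxr'
              rw [PySem.Dict.get?_insert_self] at h2
              simp only [Option.getD_some] at h2
              simp only [h, Option.getD_some, List.count_cons_self]
              omega
            · have hcnt : rest.count x = 0 := List.count_eq_zero.mpr hxr'
              simp only [h, Option.getD_some, List.count_cons_self, hcnt]
              omega
          · by_cases hxc : x = c
            · subst hxc
              have h2 := hall x hxr
              rw [PySem.Dict.get?_insert_self] at h2
              simp only [Option.getD_some] at h2
              simp only [h, Option.getD_some, List.count_cons_self]
              omega
            · have h2 := hall x hxr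
              rw [PySem.Dict.get?_insert] at h2
              simp only [if_neg hxc] at h2
              simpa [List.count_cons, Ne.symm hxc] using h2
        · intro hall x hxr
          rw [PySem.Dict.get?_insert]
          by_cases hxc : x = c
          · subst hxc
            have h2 := hall x (by simp)
            simp only [h, Option.getD_some, List.count_cons_self] at h2
            simp
            omega
          · have h2 := hall x (List.mem_cons_of_mem _ hxr)
            simp only [if_neg hxc]
            simpa [List.count_cons, Ne.symm hxc] using h2

-- A on the already-ordered pair of char lists is the pointwise count condition
lemma nineCore_iff (l1 l2 : List Char) :
    nineGo (l1.foldl (fun d c => d.insert c (d.getD c 0 + 1))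
              (l1.foldl (fun d c => d.insert c (0 : Int)) PySem.Dict.empty)) l2 = true
      ↔ ∀ c ∈ l2, l2.count c ≤ l1.count c := by
  set d0 := l1.foldl (fun d c => d.insert c (0 : Int)) PySem.Dict.empty with hd0
  have hget : ∀ x, (l1.foldl (fun d c => d.insert c (d.getD c 0 + 1)) d0).get? x
      = if x ∈ l1 then some ((l1.count x : Int)) else none := by
    intro x
    rw [get?_fold_incr, hd0, get?_fold_zero]
    by_cases hx : x ∈ l1 <;> simp [hx]
  rw [nineGo_iff]
  · constructor
    · intro hall c hc
      have := hall c hc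
      rw [hget] at this
      by_cases h1 : c ∈ l1
      · simp [h1] at this; exact_mod_cast this
      · simp [h1] at this
        have : l2.count c ≠ 0 := by
          simp [List.count_eq_zero]; exact hc
        omega
    · intro hall c hc
      rw [hget]
      have h2 := hall c hc
      have h1 : c ∈ l1 := by
        by_contra h1
        have : l1.count c = 0 := List.count_eq_zero.mpr h1
        have : l2.count c = 0 := by omega
        exact (List.count_eq_zero.mp this) hc
      simp [h1]
      exact_mod_cast h2
  · intro c v hcv
    rw [hget] at hcv
    by_cases h1 : c ∈ l1
    · simp [h1] at hcv; omega
    · simp [h1] at hcv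

-- B on the already-ordered pair is the same condition
lemma nineAltCore_iff (l1 l2 : List Char) :
    ((PySem.Set.ofList l2).all
        (fun c => decide (PySem.List.count l2 c ≤ PySem.List.count l1 c)) = true)
      ↔ ∀ c ∈ l2, l2.count c ≤ l1.count c := by
  rw [List.all_eq_true]
  constructor
  · intro hall c hc
    have := hall c ((PySem.Set.mem_ofList _ _).mpr hc)
    simpa [PySem.List.count_eq] using this
  · intro hall c hc
    have := hall c ((PySem.Set.mem_ofList _ _).mp hc)
    simpa [PySem.List.count_eq] using this

-- ===== VERDICT (by name: the statement is the Claim_ definition above) =====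
theorem nine_spec : Claim_equal_nine := by
  intro string1 string2 _
  unfold Spec_nine nine nine_alt
  by_cases h : PySem.Str.len string2 > PySem.Str.len string1
  · have h2 : ¬ (PySem.Str.len string1 ≥ PySem.Str.len string2) := by omega
    simp only [if_pos h, if_neg h2]
    exact Bool.eq_iff_iff.mpr ((nineCore_iff _ _).trans (nineAltCore_iff _ _).symm)
  · have h2 : PySem.Str.len string1 ≥ PySem.Str.len string2 := by omega
    simp only [if_neg h, if_pos h2]
    exact Bool.eq_iff_iff.mpr ((nineCore_iff _ _).trans (nineAltCore_iff _ _).symm)
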